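-- pv_equiv track=rewrite | github.com/xdavidg/comp_programming | Graph/xor_island.py | find_all_triples
-- ===== SOURCE A (Python) =====
-- from collections import defaultdict
--
-- def find_all_triples(N, hats):
--     triples = []
--     hat_to_indices = defaultdict(list)
--     for idx, hat in enumerate(hats):
--         hat_to_indices[hat].append(idx)
--     for A in range(N):
--         for B in range(N):
--             if B == A:
--                 continue
--             C_val = hats[A] ^ hats[B]
--             if C_val in hat_to_indices:
--                 for C in hat_to_indices[C_val]:
--                     if C != A and C != B:
--                         triples.append((A, B, C))
--     return triples
-- ===== SOURCE B (Python) =====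
-- def find_all_triples(N, hats):
--     # idiomatic: one nested comprehension with a direct scan over C, no precomputed index
--     M = len(hats)
--     return [(A, B, C)
--             for A in range(N)
--             for B in range(N) if B != A
--             for C in range(M)
--             if C != A and C != B and hats[A] ^ hats[B] == hats[C]]
-- ===== Notes on version B (the rewrite author's own statement) =====
-- stated objective: idiomatic
-- what changed: Drops the value-to-indices defaultdict (build pass + dict lookup per pair) and instead produces the result as one nested list comprehension whose third generator scans every position C and tests hats[A]^hats[B]==hats[C] directly; the increasing scan order reproduces the index-ordered dict lists exactly.
import Mathlib
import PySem

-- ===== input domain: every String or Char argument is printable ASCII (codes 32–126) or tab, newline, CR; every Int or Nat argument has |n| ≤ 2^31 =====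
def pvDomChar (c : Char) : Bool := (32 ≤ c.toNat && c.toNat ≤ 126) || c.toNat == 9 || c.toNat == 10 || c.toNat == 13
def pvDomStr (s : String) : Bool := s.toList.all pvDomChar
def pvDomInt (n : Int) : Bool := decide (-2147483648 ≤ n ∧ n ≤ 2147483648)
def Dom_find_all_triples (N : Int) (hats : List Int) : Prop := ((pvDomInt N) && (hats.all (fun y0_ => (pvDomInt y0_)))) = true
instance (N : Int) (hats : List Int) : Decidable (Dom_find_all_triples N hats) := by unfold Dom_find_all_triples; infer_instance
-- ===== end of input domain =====

-- B replaces A's precomputed value→indices dict with a nested comprehension scanning positions directly; idiomatic, same output.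


-- ===== PORT A =====
def find_all_triples (N : Int) (hats : List Int) : List (Int × Int × Int) :=
  let hatToIndices : PySem.Dict Int (List Int) :=
    (PySem.List.enumerate hats 0).foldl
      (fun d p => d.modify p.2 [] (fun l => l ++ [p.1])) PySem.Dict.empty
  (PySem.List.pyRange 0 N 1).foldl (fun acc A =>
    (PySem.List.pyRange 0 N 1).foldl (fun acc B =>
      if B = A then acc
      else
        let cVal := PySem.Int.bxor (PySem.List.pyGetD hats A 0) (PySem.List.pyGetD hats B 0)
        if hatToIndices.contains cVal then
          (hatToIndices.getD cVal []).foldl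
            (fun acc C => if C ≠ A ∧ C ≠ B then acc ++ [(A, B, C)] else acc) acc
        else acc) acc) []

-- ===== PORT B =====
def find_all_triples_alt (N : Int) (hats : List Int) : List (Int × Int × Int) :=
  let M : Int := hats.length
  (PySem.List.pyRange 0 N 1).flatMap (fun A =>
    ((PySem.List.pyRange 0 N 1).filter (fun B => B != A)).flatMap (fun B =>
      ((PySem.List.pyRange 0 M 1).filter (fun C =>
          C != A && C != B &&
          (PySem.Int.bxor (PySem.List.pyGetD hats A 0) (PySem.List.pyGetD hats B 0)
            == PySem.List.pyGetD hats C 0))).map (fun C => (A, B, C))))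

-- ===== PRECONDITION & SPEC =====
-- Pre_ excludes exactly the inputs where Python A raises IndexError: N > len(hats) makes hats[A] fail.
def Pre_find_all_triples (N : Int) (hats : List Int) : Prop := N ≤ (hats.length : Int)
instance (N : Int) (hats : List Int) : Decidable (Pre_find_all_triples N hats) := by
  unfold Pre_find_all_triples; infer_instance
def pvWitness_find_all_triples : Int × List Int := (3, [1, 2, 3])

def Spec_find_all_triples (N : Int) (hats : List Int) (out : List (Int × Int × Int)) : Prop := out = find_all_triples_alt N hats
instance (N : Int) (hats : List Int) (out : List (Int × Int × Int)) : Decidable (Spec_find_all_triples N hats out) := by unfold Spec_find_all_triples; infer_instance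

-- ===== CLAIM (what is proved, stated in full; the proofs are below) =====
def Claim_equal_find_all_triples : Prop := ∀ (N : Int) (hats : List Int), Dom_find_all_triples N hats → Pre_find_all_triples N hats → Spec_find_all_triples N hats (find_all_triples N hats)

-- ===== LEMMAS AND PROOFS =====

-- The dict built by A's first loop looks up to exactly the increasing positions holding value v.
theorem dict_getD_eq_filter (hats : List Int) (v : Int) :
    ((PySem.List.enumerate hats 0).foldl
      (fun (d : PySem.Dict Int (List Int)) p => d.modify p.2 [] (fun l => l ++ [p.1]))
      PySem.Dict.empty).getD v []
      = (PySem.List.pyRange 0 (hats.length : Int) 1).filter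
          (fun j => PySem.List.pyGetD hats j 0 == v) := by
  have hswap :
      (PySem.List.enumerate hats 0).foldl
        (fun (d : PySem.Dict Int (List Int)) p => d.modify p.2 [] (fun l => l ++ [p.1]))
        PySem.Dict.empty
      = ((PySem.List.enumerate hats 0).map (fun p => (p.2, p.1))).foldl
        (fun (d : PySem.Dict Int (List Int)) p => d.modify p.1 [] (fun l => l ++ [p.2]))
        PySem.Dict.empty := by
    rw [List.foldl_map]
  rw [hswap, PySem.Dict.getD_foldl_modify_append, PySem.Dict.getD_empty]
  rw [PySem.List.enumerate_eq_map_pyRange hats 0, List.map_map, List.filter_map, List.map_map]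
  simp [Function.comp_def]

theorem filter_flatMap {α β : Type} (l : List α) (p : α → Bool) (g : α → List β) :
    (l.filter p).flatMap g = l.flatMap (fun x => if p x then g x else []) := by
  induction l with
  | nil => rfl
  | cons x xs ih =>
    by_cases h : p x = true <;> simp [h, ih]

theorem foldl_eq_append_flatMap {α β : Type} (f : List β → α → List β) (g : α → List β)
    (hfg : ∀ acc x, f acc x = acc ++ g x) :
    ∀ (l : List α) (acc : List β), l.foldl f acc = acc ++ l.flatMap g := by
  intro l
  induction l with
  | nil => simp
  | cons x xs ih => intro acc; simp [hfg, ih]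

-- ===== VERDICT (by name: the statement is the Claim_ definition above) =====
theorem find_all_triples_spec : Claim_equal_find_all_triples := by
  intro N hats _ _
  unfold Spec_find_all_triples find_all_triples find_all_triples_alt
  simp only []
  set d := (PySem.List.enumerate hats 0).foldl
    (fun (d : PySem.Dict Int (List Int)) p => d.modify p.2 [] (fun l => l ++ [p.1]))
    PySem.Dict.empty with hd
  -- per-(A,B) contribution of A's inner-most loop, written as a flatMap body
  have hinner : ∀ (A B : Int) (acc : List (Int × Int × Int)),
      (if B = A then acc
       else
         let cVal := PySem.Int.bxor (PySem.List.pyGetD hats A 0) (PySem.List.pyGetD hats B 0)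
         if d.contains cVal then
           (d.getD cVal []).foldl
             (fun acc C => if C ≠ A ∧ C ≠ B then acc ++ [(A, B, C)] else acc) acc
         else acc)
      = acc ++ (if B != A then
          ((PySem.List.pyRange 0 (hats.length : Int) 1).filter (fun C =>
            C != A && C != B &&
            (PySem.Int.bxor (PySem.List.pyGetD hats A 0) (PySem.List.pyGetD hats B 0)
              == PySem.List.pyGetD hats C 0))).map (fun C => (A, B, C))
        else []) := by
    intro A B acc
    by_cases hBA : B = A
    · simp [hBA]
    · have hb : (B != A) = true := by simp [hBA]
      simp only [if_neg hBA, hb, if_true]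
      set cVal := PySem.Int.bxor (PySem.List.pyGetD hats A 0) (PySem.List.pyGetD hats B 0) with hc
      have hlist : d.getD cVal []
          = (PySem.List.pyRange 0 (hats.length : Int) 1).filter
              (fun j => PySem.List.pyGetD hats j 0 == cVal) := by
        rw [hd]; exact dict_getD_eq_filter hats cVal
      have hfold :
          (d.getD cVal []).foldl
            (fun acc C => if C ≠ A ∧ C ≠ B then acc ++ [(A, B, C)] else acc) acc
          = acc ++ ((PySem.List.pyRange 0 (hats.length : Int) 1).filter (fun C =>
              C != A && C != B && (cVal == PySem.List.pyGetD hats C 0))).map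
              (fun C => ((A : Int), (B : Int), C)) := by
        rw [hlist, PySem.List.foldl_append_ite, List.filter_filter]
        congr 2
        apply List.filter_congr
        intro C _
        have hsym : (cVal == PySem.List.pyGetD hats C 0) = (PySem.List.pyGetD hats C 0 == cVal) := by
          by_cases h : cVal = PySem.List.pyGetD hats C 0
          · simp [h]
          · simp [h, show ¬ PySem.List.pyGetD hats C 0 = cVal from fun hh => h hh.symm]
        rw [hsym]
        by_cases h1 : C = A <;> by_cases h2 : C = B <;>
          simp [h1, h2, bne]
      by_cases hcont : d.contains cVal = true
      · simp only [hcont, if_true]; exact hfold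
      · have hempty : d.getD cVal [] = [] := by
          rw [hd] at hcont ⊢
          rw [PySem.Dict.getD_of_not_contains]; simpa using hcont
        rw [hempty] at hfold
        simp only [List.foldl_nil] at hfold
        simp only [hcont, Bool.false_eq_true, if_false]
        exact hfold
  calc
    (PySem.List.pyRange 0 N 1).foldl (fun acc A =>
      (PySem.List.pyRange 0 N 1).foldl (fun acc B =>
        if B = A then acc
        else
          let cVal := PySem.Int.bxor (PySem.List.pyGetD hats A 0) (PySem.List.pyGetD hats B 0)
          if d.contains cVal then
            (d.getD cVal []).foldl
              (fun acc C => if C ≠ A ∧ C ≠ B then acc ++ [(A, B, C)] else acc) acc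
          else acc) acc) []
      = (PySem.List.pyRange 0 N 1).flatMap (fun A =>
          (PySem.List.pyRange 0 N 1).flatMap (fun B =>
            if B != A then
              ((PySem.List.pyRange 0 (hats.length : Int) 1).filter (fun C =>
                C != A && C != B &&
                (PySem.Int.bxor (PySem.List.pyGetD hats A 0) (PySem.List.pyGetD hats B 0)
                  == PySem.List.pyGetD hats C 0))).map (fun C => (A, B, C))
            else [])) := by
        rw [foldl_eq_append_flatMap _ _ (fun acc A =>
          foldl_eq_append_flatMap _ _ (fun acc B => hinner A B acc) (PySem.List.pyRange 0 N 1) acc)]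
        rfl
    _ = _ := by
        congr 1
        funext A
        rw [filter_flatMap]
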